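-- pv_equiv track=rewrite | github.com/sujinjwa/Algorithm | programmers/Level1/기능 개발.py | solution
-- ===== SOURCE A (Python) =====
-- import math
--
-- def solution(progresses, speeds):
--     # 뒤에 있는 기능은 앞에 있는 기능이 배포될 때 함께 배포
--
--     # 1. 각 progresses에 speeds 기준 배포 몇 번 필요한지 새로운 arr에 기록
--     # 2. 앞 기능부터 순회하는데
--     #    조회한 기능이 뒤에 있는 기능보다 크면 다같이 배포
--     #    조회한 기능이 뒤에 있는 기능보다 작으면 혼자서 배포
--
--     arr = []
--     for p, s in zip(progresses, speeds):
--         # (p + s * count) >= 100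
--         # count * s >= 100 - p
--         # count >= (100 - p) / s
--         count = math.ceil((100 - p) / s)
--         arr.append(count)
--
--     answer = []
--     i = 0
--     while True:
--         if i > len(arr) - 1:
--             break
--         cnt = 1
--         for j in range(i+1, len(arr)):
--             if arr[i] >= arr[j]:
--                 cnt += 1
--             else:
--                 break
--
--         answer.append(cnt)
--         i += cnt
--
--     return answer
-- ===== SOURCE B (Python) =====
-- import math
--
-- def solution(progresses, speeds):
--     days = [math.ceil((100 - p) / s) for p, s in zip(progresses, speeds)]
--     answer = []
--     leader = 0
--     for d in days:
--         if answer and d <= leader: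
--             answer[-1] += 1
--         else:
--             answer.append(1)
--             leader = d
--     return answer
-- ===== Notes on version B (the rewrite author's own statement) =====
-- stated objective: simpler
-- what changed: Replaces A's outer-while/inner-for index-jumping group scan with a single forward pass over the days list that keeps a running group leader and either increments the last output entry or starts a new group; Pre_ only excludes zero speeds, where both programs raise ZeroDivisionError.
import Mathlib
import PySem

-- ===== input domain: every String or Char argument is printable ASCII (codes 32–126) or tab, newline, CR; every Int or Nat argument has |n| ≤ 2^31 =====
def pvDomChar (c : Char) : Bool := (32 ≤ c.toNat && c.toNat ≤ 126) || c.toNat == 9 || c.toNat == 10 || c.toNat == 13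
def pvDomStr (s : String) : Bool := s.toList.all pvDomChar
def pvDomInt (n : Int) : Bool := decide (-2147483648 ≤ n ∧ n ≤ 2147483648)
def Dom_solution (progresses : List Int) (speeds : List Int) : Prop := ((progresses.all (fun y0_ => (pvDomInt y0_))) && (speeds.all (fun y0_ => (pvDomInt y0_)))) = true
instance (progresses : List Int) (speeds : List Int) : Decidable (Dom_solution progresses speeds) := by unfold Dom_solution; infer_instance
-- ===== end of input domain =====

-- B replaces A's outer-while/inner-for group scan with one forward pass keeping a running group leader (objective: simpler).


-- ===== PORT A =====
-- math.ceil((100 - p) / s): on the admitted domain |100 - p| < 2^53, so Python's float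
-- division is exact enough that the result equals the exact integer ceiling -((-a) // s).
def pvCeilDays (p : Int) (s : Int) : Int := -(PySem.Int.floordiv (-(100 - p)) s)

-- inner 'for j in range(i+1, len(arr)) … break': counts consecutive arr[j] with arr[i] >= arr[j]
def pvInnerA (arr : List Int) (x : Int) (j : Nat) : Nat :=
  if h : j < arr.length then
    if x ≥ arr[j] then 1 + pvInnerA arr x (j + 1) else 0
  else 0
termination_by arr.length - j

-- outer 'while True' loop: i jumps by cnt, answer.append(cnt)
def pvOuterA (arr : List Int) (i : Nat) (answer : List Int) : List Int :=
  if h : i ≥ arr.length then answer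
  else
    let k := pvInnerA arr arr[i] (i + 1)
    pvOuterA arr (i + 1 + k) (answer ++ [1 + (k : Int)])
termination_by arr.length - i

def solution (progresses : List Int) (speeds : List Int) : List Int :=
  pvOuterA ((progresses.zip speeds).map fun q => pvCeilDays q.1 q.2) 0 []

-- ===== PORT B =====
-- answer[-1] += 1
def pvIncLast : List Int → List Int
  | [] => []
  | [c] => [c + 1]
  | c :: rest => c :: pvIncLast rest

def pvLoopB : List Int → Int → List Int → List Int
  | [], _, answer => answer
  | d :: rest, leader, answer =>
    if answer ≠ [] ∧ d ≤ leader then pvLoopB rest leader (pvIncLast answer)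
    else pvLoopB rest d (answer ++ [1])

def solution_alt (progresses : List Int) (speeds : List Int) : List Int :=
  pvLoopB ((progresses.zip speeds).map fun q => pvCeilDays q.1 q.2) 0 []

-- ===== PRECONDITION & SPEC =====
-- Pre_ excludes exactly the inputs where A raises ZeroDivisionError: a zero speed among the zip-paired entries.
def Pre_solution (progresses : List Int) (speeds : List Int) : Prop :=
  ∀ q ∈ progresses.zip speeds, q.2 ≠ 0
instance (progresses : List Int) (speeds : List Int) : Decidable (Pre_solution progresses speeds) := by unfold Pre_solution; infer_instance
def pvWitness_solution : List Int × List Int := ([93, 30, 55], [1, 30, 5])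

def Spec_solution (progresses : List Int) (speeds : List Int) (out : List Int) : Prop := out = solution_alt progresses speeds
instance (progresses : List Int) (speeds : List Int) (out : List Int) : Decidable (Spec_solution progresses speeds out) := by unfold Spec_solution; infer_instance

-- ===== CLAIM (what is proved, stated in full; the proofs are below) =====
def Claim_equal_solution : Prop := ∀ (progresses : List Int) (speeds : List Int), Dom_solution progresses speeds → Pre_solution progresses speeds → Spec_solution progresses speeds (solution progresses speeds)

-- ===== LEMMAS AND PROOFS =====

-- A's outer loop, restated structurally on the suffix of arr
def pvOuterL : List Int → List Int → List Int
  | [], answer => answer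
  | x :: xs, answer =>
    pvOuterL (xs.drop (xs.takeWhile (fun d => decide (d ≤ x))).length)
      (answer ++ [1 + ((xs.takeWhile (fun d => decide (d ≤ x))).length : Int)])
termination_by l _ => l.length
decreasing_by simp

theorem pvInnerA_eq (arr : List Int) (x : Int) (j : Nat) :
    pvInnerA arr x j = ((arr.drop j).takeWhile (fun d => decide (d ≤ x))).length := by
  induction j using pvInnerA.induct arr x with
  | case1 j h h2 ih =>
      have h2' : arr[j] ≤ x := h2
      rw [pvInnerA, dif_pos h, if_pos h2, ih, List.drop_eq_getElem_cons h,
        List.takeWhile_cons, if_pos (by simpa using h2'), List.length_cons]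
      omega
  | case2 j h h2 =>
      have h2' : ¬ arr[j] ≤ x := fun hh => h2 hh
      rw [pvInnerA, dif_pos h, if_neg h2, List.drop_eq_getElem_cons h,
        List.takeWhile_cons, if_neg (by simpa using h2')]
      rfl
  | case3 j h =>
      rw [pvInnerA, dif_neg h, List.drop_eq_nil_of_le (by omega)]
      rfl

theorem pvOuterA_eq_aux (arr : List Int) (n : Nat) :
    ∀ (i : Nat) (answer : List Int), arr.length - i ≤ n →
      pvOuterA arr i answer = pvOuterL (arr.drop i) answer := by
  induction n with
  | zero =>
      intro i answer hn
      rw [pvOuterA, dif_pos (by omega), List.drop_eq_nil_of_le (by omega),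
        pvOuterL.eq_1]
  | succ n ihn =>
      intro i answer hn
      by_cases hi : i ≥ arr.length
      · rw [pvOuterA, dif_pos hi, List.drop_eq_nil_of_le (by omega),
          pvOuterL.eq_1]
      · rw [pvOuterA, dif_neg hi]
        show pvOuterA arr (i + 1 + pvInnerA arr arr[i] (i + 1))
            (answer ++ [1 + (pvInnerA arr arr[i] (i + 1) : Int)]) =
          pvOuterL (arr.drop i) answer
        rw [ihn _ _ (by omega), pvInnerA_eq,
          List.drop_eq_getElem_cons (by omega : i < arr.length), pvOuterL.eq_2,
          List.drop_drop]

theorem pvOuterA_eq (arr : List Int) (i : Nat) (answer : List Int) :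
    pvOuterA arr i answer = pvOuterL (arr.drop i) answer :=
  pvOuterA_eq_aux arr (arr.length - i) i answer le_rfl

theorem pvIncLast_append (ans : List Int) (c : Int) :
    pvIncLast (ans ++ [c]) = ans ++ [c + 1] := by
  induction ans with
  | nil => rfl
  | cons a t ih =>
      cases t with
      | nil => simp [pvIncLast]
      | cons b t' => simpa [pvIncLast] using ih

theorem dropWhile_eq_drop_takeWhile (p : Int → Bool) (l : List Int) :
    l.dropWhile p = l.drop (l.takeWhile p).length := by
  induction l with
  | nil => rfl
  | cons a t ih =>
      by_cases h : p a
      · simp [List.takeWhile_cons, h, ih]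
      · simp [List.takeWhile_cons, h]

theorem pvLoopB_group (l : List Int) (x : Int) (ans : List Int) (c : Int) :
    pvLoopB l x (ans ++ [c]) =
      pvOuterL (l.dropWhile (fun d => decide (d ≤ x)))
        (ans ++ [c + ((l.takeWhile (fun d => decide (d ≤ x))).length : Int)]) := by
  induction l generalizing x ans c with
  | nil => simp [pvLoopB, pvOuterL.eq_1]
  | cons d rest ih =>
      by_cases hd : d ≤ x
      · rw [pvLoopB, if_pos ⟨by simp, hd⟩, pvIncLast_append, ih,
          List.dropWhile_cons, List.takeWhile_cons]
        rw [if_pos (by simpa using hd), if_pos (by simpa using hd)]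
        congr 2
        simp only [List.cons.injEq, and_true, List.length_cons]
        push_cast
        ring
      · rw [pvLoopB, if_neg (by simp [hd]), List.dropWhile_cons,
          List.takeWhile_cons]
        rw [if_neg (by simpa using hd), if_neg (by simpa using hd)]
        rw [pvOuterL.eq_2, List.append_assoc ans [c] _,
          ← dropWhile_eq_drop_takeWhile]
        simpa using ih d (ans ++ [c]) 1

theorem ports_agree (arr : List Int) : pvOuterA arr 0 [] = pvLoopB arr 0 [] := by
  cases arr with
  | nil => rw [pvOuterA, dif_pos (by simp)]; rfl
  | cons x xs =>
      rw [pvOuterA_eq, List.drop_zero, pvLoopB, if_neg (by simp)]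
      rw [pvLoopB_group xs x [] 1, pvOuterL.eq_2, ← dropWhile_eq_drop_takeWhile]

-- ===== VERDICT (by name: the statement is the Claim_ definition above) =====
theorem solution_spec : Claim_equal_solution := by
  intro progresses speeds _ _
  unfold Spec_solution solution solution_alt
  exact ports_agree _
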